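-- pv_equiv track=rewrite | github.com/jerryUNSW/techhse | test_5_correct_sanitization_methods.py | extract_final_answer_from_cot
-- ===== SOURCE A (Python) =====
-- def extract_final_answer_from_cot(response):
--     """Extract final answer from CoT response"""
--     # Simple extraction - look for patterns like "The answer is..." or "Therefore..."
--     lines = response.split('\n')
--     for line in reversed(lines):
--         line = line.strip()
--         if any(phrase in line.lower() for phrase in ['the answer is', 'therefore', 'thus', 'so the answer']):
--             return line
--     # If no clear pattern, return the last non-empty line
--     for line in reversed(lines):
--         if line.strip():
--             return line.strip()
--     return response.strip()
-- ===== SOURCE B (Python) =====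
-- def extract_final_answer_from_cot(response):
--     """Extract final answer from CoT response (single reverse pass with fallback)."""
--     fallback = None
--     for line in reversed(response.split('\n')):
--         s = line.strip()
--         low = s.lower()
--         if ('the answer is' in low or 'therefore' in low
--                 or 'thus' in low or 'so the answer' in low):
--             return s
--         if fallback is None and s:
--             fallback = s
--     return fallback if fallback is not None else response.strip()
-- ===== Notes on version B (the rewrite author's own statement) =====
-- stated objective: simpler
-- what changed: Replaces A's two sequential reverse scans (markers, then first non-empty line) with a single pass over the reversed lines that returns on a marker hit and records the first non-empty stripped line in a fallback variable.
import Mathlib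
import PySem

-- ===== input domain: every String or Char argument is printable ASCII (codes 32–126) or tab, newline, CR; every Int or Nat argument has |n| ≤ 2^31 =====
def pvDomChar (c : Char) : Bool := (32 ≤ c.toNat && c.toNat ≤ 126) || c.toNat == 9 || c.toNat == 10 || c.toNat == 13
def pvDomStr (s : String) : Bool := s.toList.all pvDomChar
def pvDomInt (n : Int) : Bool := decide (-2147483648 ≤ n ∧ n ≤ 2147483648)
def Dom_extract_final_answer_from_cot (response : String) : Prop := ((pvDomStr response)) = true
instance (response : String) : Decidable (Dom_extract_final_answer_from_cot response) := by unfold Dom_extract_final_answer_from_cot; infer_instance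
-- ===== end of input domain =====

-- B replaces A's two sequential reverse scans with one reverse pass keeping a fallback accumulator (objective: simpler).


-- ===== PORT A =====
-- any(phrase in line.lower() for phrase in [...])
def pvMarkerA (line : String) : Bool :=
  ["the answer is", "therefore", "thus", "so the answer"].any
    (fun phrase => PySem.Str.isIn phrase (PySem.Str.lower line))

-- first reverse loop: return stripped line containing a marker
def pvLoopA1 : List String → Option String
  | [] => none
  | l :: rest =>
    let line := PySem.Str.strip l
    if pvMarkerA line then some line else pvLoopA1 rest

-- second reverse loop: return first non-empty stripped line
def pvLoopA2 : List String → Option String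
  | [] => none
  | l :: rest =>
    if PySem.Str.strip l = "" then pvLoopA2 rest else some (PySem.Str.strip l)

def extract_final_answer_from_cot (response : String) : String :=
  let lines := (PySem.Str.split? response "\n").getD []
  match pvLoopA1 lines.reverse with
  | some line => line
  | none =>
    match pvLoopA2 lines.reverse with
    | some line => line
    | none => PySem.Str.strip response

-- ===== PORT B =====
-- explicit or-chain of the four markers, as in Source B
def pvMarkerB (low : String) : Bool :=
  PySem.Str.isIn "the answer is" low || PySem.Str.isIn "therefore" low ||
  PySem.Str.isIn "thus" low || PySem.Str.isIn "so the answer" low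

-- single reverse pass with a fallback accumulator
def pvLoopB (response : String) : List String → Option String → String
  | [], fallback => fallback.getD (PySem.Str.strip response)
  | l :: rest, fallback =>
    let s := PySem.Str.strip l
    if pvMarkerB (PySem.Str.lower s) then s
    else pvLoopB response rest (if fallback.isNone && !(s = "") then some s else fallback)

def extract_final_answer_from_cot_alt (response : String) : String :=
  pvLoopB response ((PySem.Str.split? response "\n").getD []).reverse none

-- ===== PRECONDITION & SPEC =====
def Spec_extract_final_answer_from_cot (response : String) (out : String) : Prop := out = extract_final_answer_from_cot_alt response
instance (response : String) (out : String) : Decidable (Spec_extract_final_answer_from_cot response out) := by unfold Spec_extract_final_answer_from_cot; infer_instance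

-- ===== CLAIM (what is proved, stated in full; the proofs are below) =====
def Claim_equal_extract_final_answer_from_cot : Prop := ∀ (response : String), Dom_extract_final_answer_from_cot response → Spec_extract_final_answer_from_cot response (extract_final_answer_from_cot response)

-- ===== LEMMAS AND PROOFS =====

theorem pvMarker_eq (s : String) : pvMarkerB (PySem.Str.lower s) = pvMarkerA s := by
  simp [pvMarkerA, pvMarkerB, List.any, Bool.or_assoc]

-- the single pass equals: first marker hit, else the fallback-or-first-non-empty, else strip response
theorem pvLoopB_eq (response : String) (ls : List String) (fb : Option String) :
    pvLoopB response ls fb =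
      match pvLoopA1 ls with
      | some line => line
      | none => (fb.orElse (fun _ => pvLoopA2 ls)).getD (PySem.Str.strip response) := by
  induction ls generalizing fb with
  | nil => cases fb <;> simp [pvLoopB, pvLoopA1, pvLoopA2, Option.orElse]
  | cons l rest ih =>
    simp only [pvLoopB, pvLoopA1, pvLoopA2, pvMarker_eq]
    by_cases hm : pvMarkerA (PySem.Str.strip l)
    · simp [hm]
    · simp only [hm, if_false, Bool.false_eq_true, ih]
      cases fb with
      | some x => simp [Option.orElse]
      | none =>
        by_cases hs : PySem.Str.strip l = ""
        · simp [hs, Option.orElse]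
        · simp [hs, Option.orElse]

-- ===== VERDICT (by name: the statement is the Claim_ definition above) =====
theorem extract_final_answer_from_cot_spec : Claim_equal_extract_final_answer_from_cot := by
  intro response _
  unfold Spec_extract_final_answer_from_cot extract_final_answer_from_cot extract_final_answer_from_cot_alt
  rw [pvLoopB_eq]
  cases h1 : pvLoopA1 ((PySem.Str.split? response "\n").getD []).reverse <;>
    cases h2 : pvLoopA2 ((PySem.Str.split? response "\n").getD []).reverse <;>
    simp [h1, h2, Option.orElse]
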